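-- pv_equiv track=rewrite | github.com/Hulyamr13/hackerrank | GCD Product.py | solve
-- ===== SOURCE A (Python) =====
-- MOD = 1000000007
--
-- def mod_exp(a, b, n):
--     c = 1
--     d = a
--     while b:
--         if b & 1:
--             c = (c * d) % n
--         d = (d * d) % n
--         b >>= 1
--     return c
--
-- def solve(n, m):
--     isprime = [True] * 15000001
--     isprime[0] = isprime[1] = False
--     factor = []
--
--     nf = 0
--     for i in range(2, min(n, m) + 1):
--         if isprime[i]:
--             for j in range(i + i, min(n, m) + 1, i):
--                 isprime[j] = False
--             factor.append(i)
--             nf += 1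
--
--     ans = 1
--
--     for i in range(nf):
--         tmp = 0
--         now = factor[i]
--         while n // now and m // now:
--             tmp += (n // now) * (m // now)
--             now *= factor[i]
--         ans = (ans * mod_exp(factor[i], tmp, MOD)) % MOD
--
--     return ans
-- ===== SOURCE B (Python) =====
-- MOD = 1000000007
--
--
-- def _gexp(a, b, d):
--     # sum of (a // d**k) * (b // d**k) over k >= 0 while both stay positive
--     if a <= 0 or b <= 0:
--         return 0
--     return a * b + _gexp(a // d, b // d, d)
--
--
-- def solve(n, m):
--     top = min(n, m)
--     # mark every composite <= top: multiples of each p >= 2 starting at p*p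
--     comps = set()
--     p = 2
--     while p * p <= top:
--         comps.update(range(p * p, top + 1, p))
--         p += 1
--     ans = 1
--     for d in range(2, top + 1):
--         if d not in comps:
--             ans = ans * pow(d, _gexp(n // d, m // d, d), MOD) % MOD
--     return ans
-- ===== Notes on version B (the rewrite author's own statement) =====
-- stated objective: alternative
-- what changed: Replaced the fixed 15,000,001-entry boolean Eratosthenes sieve (with its feedback-dependent marking and factor list) and the hand-written square-and-multiply mod_exp by a feedback-free composite set that marks multiples of every p with p*p <= min(n,m), a recursive closed-form exponent helper gexp, and Python's builtin three-argument pow; B never allocates the 15-million-entry array A pays for on every call.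
import Mathlib
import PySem

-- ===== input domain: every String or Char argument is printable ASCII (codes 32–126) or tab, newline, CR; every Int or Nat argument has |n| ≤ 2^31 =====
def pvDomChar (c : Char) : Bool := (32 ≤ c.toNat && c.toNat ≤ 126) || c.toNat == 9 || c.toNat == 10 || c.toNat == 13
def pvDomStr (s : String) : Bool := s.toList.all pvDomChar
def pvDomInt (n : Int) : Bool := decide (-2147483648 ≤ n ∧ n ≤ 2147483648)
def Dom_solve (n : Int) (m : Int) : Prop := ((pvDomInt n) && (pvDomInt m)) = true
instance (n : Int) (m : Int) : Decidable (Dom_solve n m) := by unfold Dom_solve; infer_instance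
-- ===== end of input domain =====

-- B replaces A's fixed 15-million-entry prime sieve + hand-written square-and-multiply modexp with a
-- feedback-free composite-set sieve bounded by √min(n,m), a recursive exponent formula and builtin pow.
-- Every loop is ported as structural recursion on an explicit fuel : Nat chosen large enough at each
-- call site to cover all iterations of the Python loop (proved where the equivalence needs it).

-- ===== PORT A =====
def MODC : Int := 1000000007

-- while b: if b & 1: c = c*d % n; d = d*d % n; b >>= 1   (b ≥ 0 on every reachable call,
-- and then the loop runs at most b.toNat + 1 times; for b < 0 Python would loop forever)
def modExpLoop : Nat → Int → Int → Int → Int → Int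
  | 0, c, _, _, _ => c
  | fuel + 1, c, d, b, nn =>
    if 1 ≤ b then
      modExpLoop fuel (if PySem.Int.mod b 2 = 1 then PySem.Int.mod (c * d) nn else c)
        (PySem.Int.mod (d * d) nn) (PySem.Int.floordiv b 2) nn
    else c

def mod_exp (a b n : Int) : Int := modExpLoop (b.toNat + 1) 1 a b n

-- inner loop: for j in range(i+i, M+1, i): isprime[j] = False  (at most M+1 iterations)
def sieveMark : Nat → Array Bool → Nat → Nat → Nat → Array Bool
  | 0, arr, _, _, _ => arr
  | fuel + 1, arr, j, step, M =>
    if j ≤ M then sieveMark fuel (arr.setIfInBounds j false) (j + step) step M else arr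

-- outer loop: for i in range(2, M+1): if isprime[i]: mark multiples; factor.append(i)
def sieveLoop : Nat → Array Bool → List Nat → Nat → Nat → Array Bool × List Nat
  | 0, arr, factor, _, _ => (arr, factor)
  | fuel + 1, arr, factor, i, M =>
    if i ≤ M then
      if arr.getD i false then
        sieveLoop fuel (sieveMark (M + 1) arr (i + i) i M) (factor ++ [i]) (i + 1) M
      else sieveLoop fuel arr factor (i + 1) M
    else (arr, factor)

-- tmp/now loop: while n//now and m//now: tmp += (n//now)*(m//now); now *= p
-- (reachable calls have 2 ≤ p = now ≤ n, so the loop runs fewer than n.toNat + 1 times)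
def tmpLoop : Nat → Int → Int → Int → Int → Int → Int
  | 0, _, _, _, _, tmp => tmp
  | fuel + 1, n, m, p, now, tmp =>
    if PySem.Int.floordiv n now ≠ 0 ∧ PySem.Int.floordiv m now ≠ 0 then
      tmpLoop fuel n m p (now * p) (tmp + PySem.Int.floordiv n now * PySem.Int.floordiv m now)
    else tmp

def solve (n : Int) (m : Int) : Int :=
  let M := min n m
  let arr0 := ((Array.replicate 15000001 true).setIfInBounds 0 false).setIfInBounds 1 false
  ((sieveLoop (M.toNat + 1) arr0 [] 2 M.toNat).2).foldl
    (fun (ans : Int) (p : Nat) =>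
      PySem.Int.mod (ans * mod_exp (p : Int) (tmpLoop (n.toNat + 1) n m (p : Int) (p : Int) 0) MODC) MODC) 1

-- ===== PORT B =====
-- _gexp(a, b, d) = 0 if a <= 0 or b <= 0 else a*b + _gexp(a//d, b//d, d)
-- (reachable calls have d ≥ 2, so the recursion depth is at most a.toNat + 1)
def gexpFuel : Nat → Int → Int → Int → Int
  | 0, _, _, _ => 0
  | fuel + 1, a, b, d =>
    if 1 ≤ a ∧ 1 ≤ b then a * b + gexpFuel fuel (PySem.Int.floordiv a d) (PySem.Int.floordiv b d) d
    else 0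

def gexp (a b d : Int) : Int := gexpFuel (a.toNat + 1) a b d

-- comps.update(range(p*p, top+1, p))  (at most top+1 iterations)
def addRange : Nat → PySem.Set Nat → Nat → Nat → Nat → PySem.Set Nat
  | 0, s, _, _, _ => s
  | fuel + 1, s, j, step, top =>
    if j ≤ top then addRange fuel (PySem.Set.add s j) (j + step) step top else s

-- while p*p <= top: comps.update(range(p*p, top+1, p)); p += 1
def compsLoop : Nat → PySem.Set Nat → Nat → Nat → PySem.Set Nat
  | 0, s, _, _ => s
  | fuel + 1, s, p, top =>
    if p * p ≤ top then compsLoop fuel (addRange (top + 1) s (p * p) p top) (p + 1) top else s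

-- for d in range(2, top+1): if d not in comps: ans = ans * pow(d, _gexp(n//d, m//d, d), MOD) % MOD
-- pow(x, e, MOD) with e ≥ 0 is PySem.Int.powMod x e.toNat MODC (_gexp never returns a negative value)
def altLoop : Nat → Int → Int → PySem.Set Nat → Nat → Nat → Int → Int
  | 0, _, _, _, _, _, ans => ans
  | fuel + 1, n, m, comps, d, top, ans =>
    if d ≤ top then
      altLoop fuel n m comps (d + 1) top
        (if comps.contains d then ans
         else PySem.Int.mod
          (ans * PySem.Int.powMod (d : Int)
            (gexp (PySem.Int.floordiv n (d : Int)) (PySem.Int.floordiv m (d : Int)) (d : Int)).toNat MODC) MODC)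
    else ans

def solve_alt (n : Int) (m : Int) : Int :=
  let top := min n m
  altLoop (top.toNat + 1) n m (compsLoop (top.toNat + 1) PySem.Set.empty 2 top.toNat) 2 top.toNat 1

-- ===== PRECONDITION & SPEC =====
-- A indexes a fixed list of 15000001 booleans at positions up to min(n, m), so it raises
-- IndexError exactly when min(n, m) > 15000000; Pre_ excludes exactly those inputs.
def Pre_solve (n : Int) (m : Int) : Prop := min n m ≤ 15000000
instance (n : Int) (m : Int) : Decidable (Pre_solve n m) := by unfold Pre_solve; infer_instance
def pvWitness_solve : Int × Int := (6, 10)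

def Spec_solve (n : Int) (m : Int) (out : Int) : Prop := out = solve_alt n m
instance (n : Int) (m : Int) (out : Int) : Decidable (Spec_solve n m out) := by unfold Spec_solve; infer_instance

-- ===== CLAIM (what is proved, stated in full; the proofs are below) =====
def Claim_equal_solve : Prop := ∀ (n : Int) (m : Int), Dom_solve n m → Pre_solve n m → Spec_solve n m (solve n m)

-- ===== LEMMAS AND PROOFS =====

-- "d has a proper divisor ≥ 2" (composite test used to characterise both sieves)
def hasSD (d : Nat) : Bool := decide (∃ q < d, 2 ≤ q ∧ q ∣ d)

-- the list of numbers in [2, M] with no proper divisor ≥ 2, in increasing order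
def primesUpTo (M : Nat) : List Nat := (List.range' 2 (M - 1)).filter (fun d => !hasSD d)

theorem hasSD' (d : Nat) (hd : 2 ≤ d) :
    (∃ q < d, 2 ≤ q ∧ q ∣ d) ↔ ∃ q, 2 ≤ q ∧ q * q ≤ d ∧ q ∣ d := by
  constructor
  · rintro ⟨q, hlt, hq2, hdvd⟩
    by_cases hsq : q * q ≤ d
    · exact ⟨q, hq2, hsq, hdvd⟩
    · set r := d / q with hr
      have hdq : q * r = d := Nat.mul_div_cancel' hdvd
      have hr2 : 2 ≤ r := by
        rcases Nat.lt_or_ge r 2 with h6 | h6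
        · interval_cases r <;> omega
        · exact h6
      have hrq : r < q := by
        by_contra hge
        push Not at hge
        have : q * q ≤ q * r := Nat.mul_le_mul_left q hge
        omega
      refine ⟨r, hr2, ?_, Nat.div_dvd_of_dvd hdvd⟩
      calc r * r ≤ q * r := Nat.mul_le_mul_right r hrq.le
        _ = d := hdq
  · rintro ⟨q, hq2, hsq, hdvd⟩
    refine ⟨q, ?_, hq2, hdvd⟩
    have h1 : q ≤ q * q := Nat.le_mul_of_pos_left q (by omega)
    rcases Nat.lt_or_ge q d with h | h
    · exact h
    · exfalso
      have : q = d := Nat.le_antisymm (le_trans h1 hsq) h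
      subst this
      nlinarith

theorem size_sieveMark (fuel : Nat) (arr : Array Bool) (j step M : Nat) :
    (sieveMark fuel arr j step M).size = arr.size := by
  induction fuel generalizing arr j with
  | zero => rfl
  | succ fuel ih =>
    simp only [sieveMark]
    by_cases hj : j ≤ M
    · rw [if_pos hj, ih]
      simp
    · rw [if_neg hj]

theorem getD_sieveMark (fuel : Nat) (arr : Array Bool) (j step M k : Nat) (hM : M < arr.size)
    (hstep : 0 < step) (hfuel : M + 1 - j ≤ fuel) :
    ((sieveMark fuel arr j step M).getD k false = false ↔
      arr.getD k false = false ∨ (j ≤ k ∧ k ≤ M ∧ step ∣ (k - j))) := by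
  induction fuel generalizing arr j with
  | zero =>
    simp only [sieveMark]
    constructor
    · exact Or.inl
    · rintro (h1 | ⟨h2, h3, _⟩)
      · exact h1
      · omega
  | succ fuel ih =>
    simp only [sieveMark]
    by_cases hj : j ≤ M
    · rw [if_pos hj]
      rw [ih (arr.setIfInBounds j false) (j + step) (by simpa using hM) (by omega)]
      simp only [Array.getD_eq_getD_getElem?, Array.getElem?_setIfInBounds]
      by_cases hk : j = k
      · subst hk
        have hlt : j < arr.size := by omega
        rw [if_pos rfl, if_pos hlt]
        simp only [Option.getD_some]
        constructor
        · intro _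
          exact Or.inr ⟨le_rfl, hj, by simp⟩
        · intro _
          exact Or.inl trivial
      · rw [if_neg hk]
        constructor
        · rintro (h1 | ⟨h2, h3, h4⟩)
          · exact Or.inl h1
          · refine Or.inr ⟨by omega, h3, ?_⟩
            have heq : k - j = (k - (j + step)) + step := by omega
            rw [heq]
            exact dvd_add h4 dvd_rfl
        · rintro (h1 | ⟨h2, h3, h4⟩)
          · exact Or.inl h1
          · have hne : j < k := by omega
            have hle : step ≤ k - j := Nat.le_of_dvd (by omega) h4
            refine Or.inr ⟨by omega, h3, ?_⟩
            have heq : k - (j + step) = (k - j) - step := by omega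
            rw [heq]
            exact Nat.dvd_sub h4 dvd_rfl
    · rw [if_neg hj]
      constructor
      · exact Or.inl
      · rintro (h1 | ⟨h2, h3, _⟩)
        · exact h1
        · omega

theorem sieve_main (M : Nat) (hM : M ≤ 15000000) :
    ∀ fuel i arr factor, M + 1 - i ≤ fuel → 2 ≤ i → i ≤ M + 1 → arr.size = 15000001 →
    (∀ j, j ≤ M → ((arr.getD j false = false) ↔ (j ≤ 1 ∨ ∃ q, 2 ≤ q ∧ q < i ∧ q ∣ j ∧ q ≠ j))) →
    factor = (List.range' 2 (i - 2)).filter (fun d => !hasSD d) →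
    (sieveLoop fuel arr factor i M).2 = primesUpTo M := by
  intro fuel
  induction fuel with
  | zero =>
    intro i arr factor hK hi2 hi1 hsz hinv hfac
    have hiM : i = M + 1 := by omega
    simp only [sieveLoop]
    subst hiM hfac
    simp [primesUpTo]
  | succ fuel ih =>
    intro i arr factor hK hi2 hi1 hsz hinv hfac
    by_cases hi : i ≤ M
    · -- the value the sieve reads at i is the composite test
      have hread : arr.getD i false = false ↔ hasSD i = true := by
        rw [hinv i hi]
        simp only [hasSD, decide_eq_true_eq]
        constructor
        · rintro (h1 | ⟨q, hq2, hqi, hqd, hqne⟩)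
          · omega
          · exact ⟨q, hqi, hq2, hqd⟩
        · rintro ⟨q, hqi, hq2, hqd⟩
          exact Or.inr ⟨q, hq2, hqi, hqd, by omega⟩
      simp only [sieveLoop]
      rw [if_pos hi]
      have hrange : List.range' 2 (i + 1 - 2) =
          List.range' 2 (i - 2) ++ [i] := by
        have h1 : i + 1 - 2 = (i - 2) + 1 := by omega
        rw [h1, List.range'_concat]
        congr 2
        omega
      by_cases hb : arr.getD i false = true
      · rw [if_pos hb]
        have hnotSD : hasSD i = false := by
          rcases Bool.eq_false_or_eq_true (hasSD i) with h | h
          · rw [← hread] at h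
            rw [h] at hb
            exact absurd hb (by simp)
          · exact h
        apply ih (i + 1) _ _ (by omega) (by omega) (by omega)
          (by rw [size_sieveMark]; exact hsz)
        · -- invariant advances to i + 1 after marking multiples of the prime i
          intro j hj
          rw [getD_sieveMark (M + 1) arr (i + i) i M j (by omega) (by omega) (by omega), hinv j hj]
          constructor
          · rintro ((h1 | ⟨q, hq2, hqi, hqd, hqne⟩) | ⟨h2i, hjM, hdvd⟩)
            · exact Or.inl h1
            · exact Or.inr ⟨q, hq2, by omega, hqd, hqne⟩
            · refine Or.inr ⟨i, hi2, by omega, ?_, by omega⟩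
              have heq : j = (j - (i + i)) + (i + i) := by omega
              rw [heq]
              exact dvd_add hdvd ⟨2, by ring⟩
          · rintro (h1 | ⟨q, hq2, hqi, hqd, hqne⟩)
            · exact Or.inl (Or.inl h1)
            · by_cases hqlt : q < i
              · exact Or.inl (Or.inr ⟨q, hq2, hqlt, hqd, hqne⟩)
              · have hqeq : q = i := by omega
                subst hqeq
                obtain ⟨t, ht⟩ := hqd
                rcases Nat.lt_or_ge t 2 with ht2 | ht2
                · -- t = 0 gives j = 0 (already false in arr), t = 1 contradicts q ≠ j
                  interval_cases t
                  · exact Or.inl (Or.inl (by omega))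
                  · omega
                refine Or.inr ⟨by nlinarith, hj, ?_⟩
                refine ⟨t - 2, ?_⟩
                have : q * t - (q + q) = q * (t - 2) := by
                  rw [Nat.mul_sub]
                  omega
                omega
        · -- factor gains i
          rw [hfac, hrange, List.filter_append]
          simp [hnotSD]
      · -- i is composite: nothing marked, factor unchanged
        rw [if_neg hb]
        have hSD : hasSD i = true := by
          rw [← hread]
          simpa using hb
        apply ih (i + 1) _ _ (by omega) (by omega) (by omega) hsz
        · intro j hj
          rw [hinv j hj]
          constructor
          · rintro (h1 | ⟨q, hq2, hqi, hqd, hqne⟩)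
            · exact Or.inl h1
            · exact Or.inr ⟨q, hq2, by omega, hqd, hqne⟩
          · rintro (h1 | ⟨q, hq2, hqi, hqd, hqne⟩)
            · exact Or.inl h1
            · by_cases hqlt : q < i
              · exact Or.inr ⟨q, hq2, hqlt, hqd, hqne⟩
              · have hqeq : q = i := by omega
                subst hqeq
                simp only [hasSD, decide_eq_true_eq] at hSD
                obtain ⟨r, hri, hr2, hrd⟩ := hSD
                refine Or.inr ⟨r, hr2, by omega, hrd.trans hqd, ?_⟩
                intro hrj
                subst hrj
                have := Nat.le_of_dvd (by omega) hqd
                omega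
        · rw [hfac, hrange, List.filter_append]
          simp [hSD]
    · simp only [sieveLoop]
      rw [if_neg hi]
      have hiM : i = M + 1 := by omega
      subst hiM hfac
      simp [primesUpTo]

theorem solve_factor (n m : Int) (h : min n m ≤ 15000000) :
    solve n m = (primesUpTo (min n m).toNat).foldl
      (fun (ans : Int) (p : Nat) =>
        PySem.Int.mod (ans * mod_exp (p : Int) (tmpLoop (n.toNat + 1) n m (p : Int) (p : Int) 0) MODC) MODC) 1 := by
  have hM : (min n m).toNat ≤ 15000000 := by omega
  set Mt := (min n m).toNat with hMt
  rcases Nat.lt_or_ge Mt 2 with h2 | h2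
  · -- empty sieve: factor = [] and primesUpTo Mt = []
    have h0 : Mt - 1 = 0 := by omega
    conv_lhs => rw [solve]
    have h1 : Mt + 1 = (Mt) + 1 := rfl
    simp only [sieveLoop]
    rw [if_neg (by omega : ¬ 2 ≤ Mt)]
    simp [primesUpTo, h0]
  · have harr : ∀ j, j ≤ Mt →
        ((((Array.replicate 15000001 true).setIfInBounds 0 false).setIfInBounds 1 false).getD j false = false
          ↔ (j ≤ 1 ∨ ∃ q, 2 ≤ q ∧ q < 2 ∧ q ∣ j ∧ q ≠ j)) := by
      intro j hj
      have hjs : j < 15000001 := by omega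
      simp only [Array.getD_eq_getD_getElem?, Array.getElem?_setIfInBounds,
        Array.size_setIfInBounds, Array.size_replicate, Array.getElem?_replicate]
      rcases Nat.lt_or_ge j 2 with hj2 | hj2
      · interval_cases j <;> simp
      · have h1 : (1 : Nat) ≠ j := by omega
        have h0 : (0 : Nat) ≠ j := by omega
        simp only [if_neg h1, if_neg h0, if_pos hjs, Option.getD_some]
        constructor
        · intro hh
          simp at hh
        · rintro (hh | ⟨q, hq2, hqlt, -, -⟩) <;> omega
    have hfac := sieve_main Mt hM (Mt + 1) 2
      (((Array.replicate 15000001 true).setIfInBounds 0 false).setIfInBounds 1 false) []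
      (by omega) (by omega) (by omega) (by simp) harr (by simp)
    conv_lhs => rw [solve]
    rw [hfac]

theorem mem_addRange (fuel : Nat) (s : PySem.Set Nat) (j step top x : Nat)
    (hstep : 0 < step) (hfuel : top + 1 - j ≤ fuel) :
    x ∈ addRange fuel s j step top ↔ x ∈ s ∨ (j ≤ x ∧ x ≤ top ∧ step ∣ (x - j)) := by
  induction fuel generalizing s j with
  | zero =>
    simp only [addRange]
    constructor
    · exact Or.inl
    · rintro (h1 | ⟨h2, h3, _⟩)
      · exact h1
      · omega
  | succ fuel ih =>
    simp only [addRange]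
    by_cases hj : j ≤ top
    · rw [if_pos hj]
      rw [ih (PySem.Set.add s j) (j + step) (by omega)]
      rw [PySem.Set.mem_add]
      by_cases hx : x = j
      · subst hx
        constructor
        · intro _
          exact Or.inr ⟨le_rfl, hj, by simp⟩
        · intro _
          exact Or.inl (Or.inr rfl)
      · constructor
        · rintro ((h1 | h1) | ⟨h2, h3, h4⟩)
          · exact Or.inl h1
          · exact absurd h1 hx
          · refine Or.inr ⟨by omega, h3, ?_⟩
            have heq : x - j = (x - (j + step)) + step := by omega
            rw [heq]
            exact dvd_add h4 dvd_rfl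
        · rintro (h1 | ⟨h2, h3, h4⟩)
          · exact Or.inl (Or.inl h1)
          · have hne : j < x := by omega
            have hle : step ≤ x - j := Nat.le_of_dvd (by omega) h4
            refine Or.inr ⟨by omega, h3, ?_⟩
            have heq : x - (j + step) = (x - j) - step := by omega
            rw [heq]
            exact Nat.dvd_sub h4 dvd_rfl
    · rw [if_neg hj]
      constructor
      · exact Or.inl
      · rintro (h1 | ⟨h2, h3, _⟩)
        · exact h1
        · omega

theorem mem_compsLoop (top : Nat) :
    ∀ fuel p s x, top + 1 - p ≤ fuel → 0 < p →
    (x ∈ compsLoop fuel s p top ↔ x ∈ s ∨ ∃ q, p ≤ q ∧ q * q ≤ x ∧ x ≤ top ∧ q ∣ x) := by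
  intro fuel
  induction fuel with
  | zero =>
    intro p s x hK hp
    simp only [compsLoop]
    constructor
    · exact Or.inl
    · rintro (h1 | ⟨q, hq1, hq2, hq3, hq4⟩)
      · exact h1
      · have h5 : q ≤ q * q := Nat.le_mul_of_pos_left q (by omega)
        omega
  | succ fuel ih =>
    intro p s x hK hp
    simp only [compsLoop]
    by_cases hpp : p * p ≤ top
    · rw [if_pos hpp]
      rw [ih (p + 1) _ x (by omega) (by omega)]
      rw [mem_addRange (top + 1) s (p * p) p top x hp (by omega)]
      constructor
      · rintro ((h1 | ⟨h2, h3, h4⟩) | ⟨q, hq1, hq2, hq3, hq4⟩)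
        · exact Or.inl h1
        · refine Or.inr ⟨p, le_rfl, by omega, h3, ?_⟩
          have heq : x = (x - p * p) + p * p := by omega
          rw [heq]
          exact dvd_add h4 (Dvd.intro p rfl)
        · exact Or.inr ⟨q, by omega, hq2, hq3, hq4⟩
      · rintro (h1 | ⟨q, hq1, hq2, hq3, hq4⟩)
        · exact Or.inl (Or.inl h1)
        · rcases eq_or_ne q p with rfl | hqp
          · refine Or.inl (Or.inr ⟨hq2, hq3, ?_⟩)
            exact Nat.dvd_sub hq4 (Dvd.intro q rfl)
          · exact Or.inr ⟨q, by omega, hq2, hq3, hq4⟩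
    · rw [if_neg hpp]
      constructor
      · exact Or.inl
      · rintro (h1 | ⟨q, hq1, hq2, hq3, hq4⟩)
        · exact h1
        · have : p * p ≤ q * q := Nat.mul_le_mul hq1 hq1
          omega

theorem altLoop_foldl (n m : Int) (comps : PySem.Set Nat) (top : Nat) :
    ∀ fuel d ans, top + 1 - d ≤ fuel →
    altLoop fuel n m comps d top ans = (List.range' d (top + 1 - d)).foldl
      (fun (ans : Int) (k : Nat) => if comps.contains k then ans
       else PySem.Int.mod
        (ans * PySem.Int.powMod (k : Int)
          (gexp (PySem.Int.floordiv n (k : Int)) (PySem.Int.floordiv m (k : Int)) (k : Int)).toNat MODC) MODC) ans := by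
  intro fuel
  induction fuel with
  | zero =>
    intro d ans hK
    have h0 : top + 1 - d = 0 := by omega
    simp only [altLoop]
    rw [h0]
    simp
  | succ fuel ih =>
    intro d ans hK
    simp only [altLoop]
    by_cases hd : d ≤ top
    · rw [if_pos hd, ih (d + 1) _ (by omega)]
      have h1 : top + 1 - d = (top + 1 - (d + 1)) + 1 := by omega
      rw [h1, List.range'_succ]
      rfl
    · rw [if_neg hd]
      have h0 : top + 1 - d = 0 := by omega
      rw [h0]
      simp

theorem gexpFuel_nonneg (fuel : Nat) : ∀ a b d, 0 ≤ gexpFuel fuel a b d := by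
  induction fuel with
  | zero => intro a b d; exact le_refl 0
  | succ fuel ih =>
    intro a b d
    simp only [gexpFuel]
    by_cases h : 1 ≤ a ∧ 1 ≤ b
    · rw [if_pos h]
      have := ih (PySem.Int.floordiv a d) (PySem.Int.floordiv b d) d
      nlinarith [h.1, h.2]
    · rw [if_neg h]

theorem gexp_nonneg (a b d : Int) : 0 ≤ gexp a b d := gexpFuel_nonneg _ a b d

theorem gexpFuel_congr (d : Int) (hd : 2 ≤ d) :
    ∀ f1 f2 a b, a.toNat < f1 → a.toNat < f2 → gexpFuel f1 a b d = gexpFuel f2 a b d := by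
  intro f1
  induction f1 with
  | zero => intro f2 a b h1 _; omega
  | succ f1 ih =>
    intro f2 a b h1 h2
    rcases f2 with _ | f2
    · omega
    · simp only [gexpFuel]
      by_cases h : 1 ≤ a ∧ 1 ≤ b
      · rw [if_pos h, if_pos h]
        have hfd : PySem.Int.floordiv a d = a / d := PySem.Int.floordiv_eq_ediv_of_pos (by omega)
        have hlt : a / d < a := by
          rw [Int.ediv_lt_iff_lt_mul (by omega)]
          nlinarith [h.1]
        have hnn : 0 ≤ a / d := Int.ediv_nonneg (by omega) (by omega)
        rw [ih f2 (PySem.Int.floordiv a d) (PySem.Int.floordiv b d) (by rw [hfd]; omega) (by rw [hfd]; omega)]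
      · rw [if_neg h, if_neg h]

-- one Python-shaped unfolding of gexp, independent of the fuel bookkeeping
theorem gexp_unfold (a b d : Int) (hd : 2 ≤ d) :
    gexp a b d = if 1 ≤ a ∧ 1 ≤ b then
      a * b + gexp (PySem.Int.floordiv a d) (PySem.Int.floordiv b d) d else 0 := by
  rw [gexp]
  simp only [gexpFuel]
  by_cases h : 1 ≤ a ∧ 1 ≤ b
  · rw [if_pos h, if_pos h, gexp]
    congr 1
    apply gexpFuel_congr d hd
    · have hfd : PySem.Int.floordiv a d = a / d := PySem.Int.floordiv_eq_ediv_of_pos (by omega)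
      have hlt : a / d < a := by
        rw [Int.ediv_lt_iff_lt_mul (by omega)]
        nlinarith [h.1]
      rw [hfd]
      omega
    · omega
  · rw [if_neg h, if_neg h]

theorem tmpLoop_eq (n m p : Int) (hn : 1 ≤ n) (hm : 1 ≤ m) (hp : 2 ≤ p) :
    ∀ fuel (now : Int) (tmp : Int), (n.toNat + 1 - now.toNat) ≤ fuel → 1 ≤ now →
    tmpLoop fuel n m p now tmp = tmp + gexp (PySem.Int.floordiv n now) (PySem.Int.floordiv m now) p := by
  intro fuel
  induction fuel with
  | zero =>
    intro now tmp hK hnow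
    -- now > n, so both divisions are 0
    have hgt : n < now := by omega
    have hfd : PySem.Int.floordiv n now = 0 := by
      rw [PySem.Int.floordiv_eq_ediv_of_pos (by omega)]
      exact Int.ediv_eq_zero_of_lt (by omega) hgt
    simp only [tmpLoop]
    rw [gexp_unfold _ _ _ hp, if_neg (by rw [hfd]; rintro ⟨h1, -⟩; omega)]
    ring
  | succ fuel ih =>
    intro now tmp hK hnow
    have hpos : (0:Int) < now := by omega
    simp only [tmpLoop]
    by_cases hle : now ≤ n
    · have hfdn : 1 ≤ PySem.Int.floordiv n now := by
        rw [PySem.Int.le_floordiv_iff_mul_le hpos]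
        omega
      have hfdn0 : PySem.Int.floordiv n now ≠ 0 := by omega
      by_cases hfm : PySem.Int.floordiv m now ≠ 0
      · have hfdm : 1 ≤ PySem.Int.floordiv m now := by
          have := Int.ediv_nonneg (by omega : (0:Int) ≤ m) (by omega : (0:Int) ≤ now)
          rw [PySem.Int.floordiv_eq_ediv_of_pos hpos] at hfm ⊢
          omega
        rw [if_pos ⟨hfdn0, hfm⟩]
        have hrec := ih (now * p) (tmp + PySem.Int.floordiv n now * PySem.Int.floordiv m now)
          (by
            have h1 : now < now * p := by nlinarith
            omega)
          (by nlinarith)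
        rw [hrec]
        have hcompn : PySem.Int.floordiv (PySem.Int.floordiv n now) p = PySem.Int.floordiv n (now * p) := by
          rw [PySem.Int.floordiv_eq_ediv_of_pos hpos, PySem.Int.floordiv_eq_ediv_of_pos (by omega : (0:Int) < p),
            PySem.Int.floordiv_eq_ediv_of_pos (by nlinarith : (0:Int) < now * p)]
          exact Int.ediv_ediv_of_nonneg (by omega)
        have hcompm : PySem.Int.floordiv (PySem.Int.floordiv m now) p = PySem.Int.floordiv m (now * p) := by
          rw [PySem.Int.floordiv_eq_ediv_of_pos hpos, PySem.Int.floordiv_eq_ediv_of_pos (by omega : (0:Int) < p),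
            PySem.Int.floordiv_eq_ediv_of_pos (by nlinarith : (0:Int) < now * p)]
          exact Int.ediv_ediv_of_nonneg (by omega)
        conv_rhs => rw [gexp_unfold _ _ _ hp, if_pos ⟨hfdn, hfdm⟩]
        rw [hcompn, hcompm]
        ring
      · -- m // now == 0 stops both the loop and the recursion
        push Not at hfm
        rw [if_neg (by rintro ⟨-, h5⟩; exact h5 hfm)]
        rw [gexp_unfold _ _ _ hp, if_neg (by rw [hfm]; rintro ⟨-, h2⟩; omega)]
        ring
    · have hfd : PySem.Int.floordiv n now = 0 := by
        rw [PySem.Int.floordiv_eq_ediv_of_pos hpos]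
        exact Int.ediv_eq_zero_of_lt (by omega) (by omega)
      rw [if_neg (by rintro ⟨h4, -⟩; exact h4 hfd)]
      rw [gexp_unfold _ _ _ hp, if_neg (by rw [hfd]; rintro ⟨h1, -⟩; omega)]
      ring

theorem emod_pow_const (nn a : Int) (k : Nat) : (a % nn) ^ k % nn = a ^ k % nn := by
  induction k with
  | zero => simp
  | succ k ih =>
    rw [pow_succ, pow_succ, Int.mul_emod, ih, Int.emod_emod_of_dvd _ dvd_rfl, ← Int.mul_emod]

theorem emod_mul_emod (nn x y : Int) : (x % nn) * (y % nn) % nn = x * y % nn := by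
  rw [Int.mul_emod, Int.emod_emod_of_dvd _ dvd_rfl, Int.emod_emod_of_dvd _ dvd_rfl, ← Int.mul_emod]

theorem modExpLoop_eq (nn : Int) (hnn : 1 < nn) :
    ∀ fuel (b : Int), b.toNat < fuel → 0 ≤ b → ∀ c d,
    modExpLoop fuel c d b nn = if b = 0 then c else PySem.Int.mod (c * d ^ b.toNat) nn := by
  intro fuel
  induction fuel with
  | zero => intro b hK; omega
  | succ fuel ih =>
    intro b hK hb c d
    simp only [modExpLoop]
    rcases eq_or_ne b 0 with rfl | hb0
    · rw [if_neg (by omega), if_pos rfl]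
    · rw [if_pos (by omega), if_neg hb0]
      have hdiv : PySem.Int.floordiv b 2 = b / 2 := PySem.Int.floordiv_eq_ediv_of_pos (by omega)
      have hmod : PySem.Int.mod b 2 = b % 2 := PySem.Int.mod_eq_emod_of_pos (by omega)
      rw [hdiv, hmod]
      have hrec := ih (b / 2) (by omega) (by omega)
      rw [hrec]
      have hMpos : (0:Int) < nn := by omega
      have hmm : ∀ x : Int, PySem.Int.mod x nn = x % nn := fun x => PySem.Int.mod_eq_emod_of_pos hMpos
      simp only [hmm]
      rcases eq_or_ne (b % 2) 1 with hodd | heven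
      · rw [if_pos hodd]
        rcases eq_or_ne (b / 2) 0 with hz | hz
        · rw [if_pos hz]
          have hb1 : b = 1 := by omega
          subst hb1
          norm_num
        · rw [if_neg hz]
          have hexp : b.toNat = 2 * (b / 2).toNat + 1 := by omega
          rw [Int.mul_emod, emod_pow_const, Int.emod_emod_of_dvd _ dvd_rfl, emod_mul_emod]
          rw [hexp, pow_succ, pow_mul]
          ring_nf
      · rw [if_neg heven]
        rcases eq_or_ne (b / 2) 0 with hz | hz
        · omega
        · rw [if_neg hz]
          have hexp : b.toNat = 2 * (b / 2).toNat := by omega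
          conv_lhs => rw [Int.mul_emod, emod_pow_const, ← Int.mul_emod]
          rw [hexp, pow_mul]
          ring_nf

theorem solve_equal (n m : Int) (hpre : min n m ≤ 15000000) : solve n m = solve_alt n m := by
  set Mt := (min n m).toNat with hMt
  have hsf := solve_factor n m hpre
  conv_rhs => rw [solve_alt]
  rw [altLoop_foldl n m _ Mt (Mt + 1) 2 1 (by omega)]
  have hlen : Mt + 1 - 2 = Mt - 1 := by omega
  rw [hlen]
  set comps := compsLoop (Mt + 1) PySem.Set.empty 2 Mt with hcomps
  have hg : (fun (ans : Int) (k : Nat) => if comps.contains k then ans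
       else PySem.Int.mod
        (ans * PySem.Int.powMod (k : Int)
          (gexp (PySem.Int.floordiv n (k : Int)) (PySem.Int.floordiv m (k : Int)) (k : Int)).toNat MODC) MODC)
      = (fun ans k => if (!(comps.contains k)) = true then
          PySem.Int.mod
        (ans * PySem.Int.powMod (k : Int)
          (gexp (PySem.Int.floordiv n (k : Int)) (PySem.Int.floordiv m (k : Int)) (k : Int)).toNat MODC) MODC
        else ans) := by
    funext ans k
    by_cases hc : comps.contains k <;> simp [hc]
  rw [hg, ← List.foldl_filter]
  have hfilter : List.filter (fun k => !(comps.contains k)) (List.range' 2 (Mt - 1))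
      = List.filter (fun d => !hasSD d) (List.range' 2 (Mt - 1)) := by
    apply List.filter_congr
    intro k hk
    rw [List.mem_range'_1] at hk
    have hk2 : 2 ≤ k := hk.1
    have hkM : k ≤ Mt := by omega
    have hmem : k ∈ comps ↔ ∃ q, 2 ≤ q ∧ q * q ≤ k ∧ q ∣ k := by
      rw [hcomps, mem_compsLoop Mt (Mt + 1) 2 _ k (by omega) (by omega)]
      constructor
      · rintro (h1 | ⟨q, hq1, hq2, -, hq4⟩)
        · simp [PySem.Set.empty] at h1
        · exact ⟨q, hq1, hq2, hq4⟩
      · rintro ⟨q, hq1, hq2, hq4⟩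
        exact Or.inr ⟨q, hq1, hq2, hkM, hq4⟩
    have hSD : hasSD k = true ↔ ∃ q, 2 ≤ q ∧ q * q ≤ k ∧ q ∣ k := by
      simp only [hasSD, decide_eq_true_eq]
      exact hasSD' k hk2
    by_cases hh : ∃ q, 2 ≤ q ∧ q * q ≤ k ∧ q ∣ k
    · have h1 : comps.contains k = true := by
        rw [PySem.Set.contains_iff, hmem]; exact hh
      have h2 : hasSD k = true := hSD.mpr hh
      rw [h1, h2]
    · have h1 : comps.contains k = false := by
        rw [← Bool.not_eq_true, PySem.Set.contains_iff, hmem]; exact hh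
      have h2 : hasSD k = false := by
        rw [← Bool.not_eq_true, hSD]; exact hh
      rw [h1, h2]
  rw [hfilter, hsf]
  show List.foldl _ 1 (primesUpTo Mt) = List.foldl _ 1 (primesUpTo Mt)
  apply PySem.List.foldl_congr_mem
  intro acc p hp
  have hpr : p ∈ List.range' 2 (Mt - 1) := List.mem_of_mem_filter hp
  rw [List.mem_range'_1] at hpr
  have hp2 : 2 ≤ p := hpr.1
  have hpM : p ≤ Mt := by omega
  have hmin2 : (2 : Int) ≤ min n m := by omega
  have hpint : (p : Int) ≤ min n m := by omega
  have hn1 : (1 : Int) ≤ n := by omega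
  have hm1 : (1 : Int) ≤ m := by omega
  have hpi2 : (2 : Int) ≤ (p : Int) := by exact_mod_cast hp2
  have htmp := tmpLoop_eq n m (p : Int) hn1 hm1 hpi2 (n.toNat + 1) (p : Int) 0 (by omega) (by omega)
  rw [htmp]
  set e := gexp (PySem.Int.floordiv n (p : Int)) (PySem.Int.floordiv m (p : Int)) (p : Int) with he
  have he0 : (0 : Int) ≤ e := gexp_nonneg _ _ _
  rw [zero_add]
  have hM1 : (1 : Int) < MODC := by unfold MODC; omega
  rw [mod_exp, modExpLoop_eq MODC hM1 (e.toNat + 1) e (by omega) he0 1 (p : Int)]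
  rcases eq_or_ne e 0 with hz | hz
  · rw [if_pos hz, hz]
    have h1m : PySem.Int.mod 1 MODC = 1 := by
      rw [PySem.Int.mod_eq_emod_of_pos (by unfold MODC; omega)]
      unfold MODC
      norm_num
    simp [PySem.Int.powMod, h1m]
  · rw [if_neg hz]
    simp [PySem.Int.powMod]

-- ===== VERDICT (by name: the statement is the Claim_ definition above) =====
theorem solve_spec : Claim_equal_solve := by
  intro n m _ hpre
  unfold Spec_solve
  exact solve_equal n m hpre
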